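-- pv_equiv track=rewrite | github.com/brianc118/tetriscube | tetriscube.py | getmat
-- ===== SOURCE A (Python) =====
-- def getmat(p):
--     """ Returns transformation corresponding to permutation list p """
--     n = len(p)
--     if min(p) < 0 or max(p) >= n:
--         raise ValueError("Invalid permutation list")
--     m = []
--     for i in range(n):
--         m.append([1 if j == p[i] else 0 for j in range(n)])
--     return m
-- ===== SOURCE B (Python) =====
-- def getmat(p):
--     """ Returns transformation corresponding to permutation list p """
--     n = len(p)
--     if min(p) < 0 or max(p) >= n:
--         raise ValueError("Invalid permutation list")
--     # precompute the n basis rows by successive right-rotation of e0,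
--     # then look each row up by the permutation value
--     basis = []
--     row = [1] + [0] * (n - 1)
--     for _ in range(n):
--         basis.append(row)
--         row = row[-1:] + row[:-1]
--     return [basis[v] for v in p]
-- ===== Notes on version B (the rewrite author's own statement) =====
-- stated objective: alternative
-- what changed: B precomputes the n basis rows once by successively right-rotating [1,0,...,0] and then builds the result by table lookup basis[v] for each v in p, instead of A's per-cell j==p[i] conditional comprehension for every row.
import Mathlib
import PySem

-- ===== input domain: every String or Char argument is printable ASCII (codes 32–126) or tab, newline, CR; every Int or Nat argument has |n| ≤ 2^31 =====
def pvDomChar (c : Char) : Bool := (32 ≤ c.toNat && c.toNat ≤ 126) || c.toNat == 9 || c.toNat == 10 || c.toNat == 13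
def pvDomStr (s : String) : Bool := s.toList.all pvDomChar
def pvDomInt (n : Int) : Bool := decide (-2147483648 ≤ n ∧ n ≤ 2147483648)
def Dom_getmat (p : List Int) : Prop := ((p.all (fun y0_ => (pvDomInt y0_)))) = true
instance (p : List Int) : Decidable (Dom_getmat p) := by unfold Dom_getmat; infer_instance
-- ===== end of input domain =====

-- B precomputes the n basis rows by successive right-rotation of [1,0,...,0] and
-- builds the result by table lookup basis[v] for v in p (alternative algorithm,
-- same cost); return values agree with A on Pre_.

-- ===== PORT A =====
-- m = []; for i in range(n): m.append([1 if j == p[i] else 0 for j in range(n)])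
def getmat (p : List Int) : List (List Int) :=
  let n : Int := (p.length : Int)
  (PySem.List.pyRange 0 n 1).foldl
    (fun m i =>
      m ++ [(PySem.List.pyRange 0 n 1).map
              (fun j => if j = PySem.List.pyGetD p i 0 then (1 : Int) else 0)])
    []

-- ===== PORT B =====
-- row[-1:] + row[:-1]  (rotate right by one)
def rotR (row : List Int) : List Int :=
  PySem.List.slice row (some (-1)) none ++ PySem.List.slice row none (some (-1))

def getmat_alt (p : List Int) : List (List Int) :=
  let n := p.length
  -- basis = []; row = [1] + [0]*(n-1); for _ in range(n): basis.append(row); row = rotR row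
  let st := (List.range n).foldl
      (fun (s : List (List Int) × List Int) _ => (s.1 ++ [s.2], rotR s.2))
      ([], 1 :: List.replicate (n - 1) 0)
  -- [basis[v] for v in p]
  p.map (fun v => PySem.List.pyGetD st.1 v [])

-- ===== PRECONDITION & SPEC =====
-- Pre_ excludes exactly the inputs on which A raises ValueError: the empty list
-- (min([]) raises) and lists with an entry < 0 or ≥ len(p) (A's explicit raise).
def Pre_getmat (p : List Int) : Prop :=
  p ≠ [] ∧ ∀ x ∈ p, 0 ≤ x ∧ x < (p.length : Int)
instance (p : List Int) : Decidable (Pre_getmat p) := by unfold Pre_getmat; infer_instance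

def pvWitness_getmat : List Int := [2, 0, 1]

def Spec_getmat (p : List Int) (out : List (List Int)) : Prop := out = getmat_alt p
instance (p : List Int) (out : List (List Int)) : Decidable (Spec_getmat p out) := by unfold Spec_getmat; infer_instance

-- ===== CLAIM (what is proved, stated in full; the proofs are below) =====
def Claim_equal_getmat : Prop := ∀ (p : List Int), Dom_getmat p → Pre_getmat p → Spec_getmat p (getmat p)

-- ===== LEMMAS AND PROOFS =====

-- the k-th standard basis row of size n
def eRow (n k : Nat) : List Int :=
  (List.range n).map (fun j => if j = k then (1 : Int) else 0)

lemma eRow_length (n k : Nat) : (eRow n k).length = n := by simp [eRow]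

lemma eRow_zero (n : Nat) (hn : 1 ≤ n) : eRow n 0 = 1 :: List.replicate (n - 1) 0 := by
  obtain ⟨m, rfl⟩ : ∃ m, n = m + 1 := ⟨n - 1, by omega⟩
  simp [eRow, List.range_succ_eq_map, List.map_map, Function.comp,
    List.eq_replicate_iff]

lemma eRow_succ (n k : Nat) (hk : k + 1 < n) :
    eRow n (k + 1) = 0 :: (eRow n k).dropLast := by
  obtain ⟨m, rfl⟩ : ∃ m, n = m + 1 := ⟨n - 1, by omega⟩
  have hdl : (eRow (m + 1) k).dropLast = (List.range m).map (fun j => if j = k then (1 : Int) else 0) := by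
    rw [List.dropLast_eq_take, eRow_length, eRow, ← List.map_take, List.take_range]
    congr 2
    omega
  rw [hdl, eRow, List.range_succ_eq_map]
  simp only [List.map_cons, List.map_map, Function.comp]
  have h0 : (if 0 = k + 1 then (1 : Int) else 0) = 0 := by simp
  rw [h0]
  congr 1
  apply List.map_congr_left
  intro j _
  by_cases h : j = k <;> simp [h]

-- one right rotation advances the basis index (while it stays below n)
lemma rotR_eRow (n k : Nat) (hk : k + 1 < n) : rotR (eRow n k) = eRow n (k + 1) := by
  unfold rotR
  rw [PySem.List.slice_from_neg_one, PySem.List.slice_to_neg_one]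
  have hne : eRow n k ≠ [] := by
    intro h
    have := eRow_length n k
    rw [h] at this
    simp at this
    omega
  rw [List.drop_length_sub_one hne, eRow_succ n k hk]
  have hlast : (eRow n k).getLast hne = 0 := by
    rw [List.getLast_eq_getElem]
    simp only [eRow, List.getElem_map, List.getElem_range, eRow_length, List.length_map,
      List.length_range]
    have : ¬ (n - 1 = k) := by omega
    simp [this]
  rw [hlast]
  rfl

-- the rotation loop produces consecutive basis rows
lemma foldl_basis (n : Nat) :
    ∀ (l : List Nat) (acc : List (List Int)) (k : Nat), k + l.length ≤ n →
    (l.foldl (fun (s : List (List Int) × List Int) _ => (s.1 ++ [s.2], rotR s.2))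
        (acc, eRow n k)).1
      = acc ++ (List.range l.length).map (fun t => eRow n (k + t)) := by
  intro l
  induction l with
  | nil => intro acc k _; simp
  | cons a l ih =>
    intro acc k hk
    simp only [List.foldl_cons]
    have hrange : (List.range (a :: l).length).map (fun t => eRow n (k + t))
        = eRow n k :: (List.range l.length).map (fun t => eRow n (k + 1 + t)) := by
      show (List.range (l.length + 1)).map (fun t => eRow n (k + t)) = _
      rw [List.range_succ_eq_map]
      simp only [List.map_cons, Nat.add_zero, List.map_map]
      congr 1
      apply List.map_congr_left
      intro t _
      simp only [Function.comp_apply]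
      rw [show k + Nat.succ t = k + 1 + t from by omega]
    rw [hrange]
    cases l with
    | nil => simp
    | cons b l' =>
      have hk1 : k + 1 < n := by simp at hk; omega
      rw [rotR_eRow n k hk1]
      rw [ih (acc ++ [eRow n k]) (k + 1) (by simp at hk ⊢; omega)]
      simp

lemma basis_eq (n : Nat) (hn : 1 ≤ n) :
    ((List.range n).foldl
      (fun (s : List (List Int) × List Int) _ => (s.1 ++ [s.2], rotR s.2))
      ([], 1 :: List.replicate (n - 1) 0)).1
    = (List.range n).map (fun t => eRow n t) := by
  rw [← eRow_zero n hn]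
  simpa using foldl_basis n (List.range n) [] 0 (by simp)

-- ===== VERDICT (by name: the statement is the Claim_ definition above) =====
theorem getmat_spec : Claim_equal_getmat := by
  intro p _ hpre
  obtain ⟨hne, hb⟩ := hpre
  have hn : 1 ≤ p.length := List.length_pos_iff.mpr hne
  unfold Spec_getmat getmat getmat_alt
  rw [PySem.List.foldl_append_singleton_eq_map, PySem.List.pyRange_zero_natCast,
      List.map_map, List.nil_append]
  show _ = List.map (fun v => PySem.List.pyGetD
      ((List.range p.length).foldl
        (fun (s : List (List Int) × List Int) _ => (s.1 ++ [s.2], rotR s.2))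
        ([], 1 :: List.replicate (p.length - 1) 0)).1 v []) p
  rw [basis_eq p.length hn]
  apply List.ext_getElem
  · simp
  · intro i hi hi'
    have hi : i < p.length := by simpa using hi
    have hp := hb p[i] (List.getElem_mem hi)
    simp only [List.getElem_map, List.getElem_range, Function.comp]
    rw [PySem.List.pyGetD_natCast, List.getD_eq_getElem p 0 hi]
    have hcast : p[i] = ((p[i].toNat : Nat) : Int) := (Int.toNat_of_nonneg hp.1).symm
    rw [hcast, PySem.List.pyGetD_natCast, List.getD_eq_getElem _ []
        (by simp; omega)]
    simp only [List.getElem_map, List.getElem_range, eRow, List.map_map]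
    apply List.map_congr_left
    intro j _
    simp only [Function.comp_apply, Nat.cast_inj]
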